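-- pv_equiv track=rewrite | github.com/ddsoriano26/aoc2023 | 9-oasis/oasis.py | predict_set
-- ===== SOURCE A (Python) =====
-- def predict_set(number_array):
--     previous_numbers = number_array[-1]
--     for numbers in reversed(number_array[:-1]):
--         last_number = numbers[-1]
--         first_number = numbers[0]
--         numbers.append(previous_numbers[-1] + last_number)
--         numbers.insert(0, first_number - previous_numbers[0])
--         previous_numbers = numbers
--     return number_array[0][0], number_array[0][-1]
-- ===== SOURCE B (Python) =====
-- def predict_set(number_array):
--     # Closed-form over the pyramid edges: next value = sum of last elements,
--     # previous value = alternating difference of first elements (no list rebuilding).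
--     nxt = 0
--     for row in number_array:
--         nxt += row[-1]
--     prv = 0
--     for row in reversed(number_array):
--         prv = row[0] - prv
--     return prv, nxt
-- ===== Notes on version B (the rewrite author's own statement) =====
-- stated objective: alternative
-- what changed: Instead of rebuilding every pyramid row bottom-up with append/insert(0,...), B computes the two answers in closed form over the row edges: the next value is the sum of the rows' last elements and the previous value is the alternating difference of the rows' first elements; B also leaves the argument unmutated.
import Mathlib
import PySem

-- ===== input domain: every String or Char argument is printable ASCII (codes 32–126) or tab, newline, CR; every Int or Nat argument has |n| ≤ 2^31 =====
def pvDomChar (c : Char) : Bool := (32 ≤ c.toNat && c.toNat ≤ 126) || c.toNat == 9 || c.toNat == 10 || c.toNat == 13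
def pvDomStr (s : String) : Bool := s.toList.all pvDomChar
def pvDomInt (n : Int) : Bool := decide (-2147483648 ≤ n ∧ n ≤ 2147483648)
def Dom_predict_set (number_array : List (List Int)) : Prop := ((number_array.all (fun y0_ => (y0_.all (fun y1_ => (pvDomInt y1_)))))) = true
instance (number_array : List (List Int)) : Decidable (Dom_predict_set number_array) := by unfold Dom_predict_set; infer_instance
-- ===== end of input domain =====

-- B replaces A's row-rebuilding loop by a closed form over row edges (sum of lasts /
-- alternating difference of firsts); equivalence is about the RETURN value only —
-- A mutates the inner lists of its argument in place, B does not.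

-- ===== PORT A =====
def predict_set (number_array : List (List Int)) : List Int :=
  match PySem.List.pyGet? number_array (-1) with
  | none => []  -- IndexError in Python (excluded by Pre_)
  | some previous_numbers0 =>
    -- for numbers in reversed(number_array[:-1]): append / insert(0, ...) on numbers
    let prev := ((PySem.List.slice number_array none (some (-1))).reverse).foldl
      (fun previous_numbers numbers =>
        let last_number := (PySem.List.pyGet? numbers (-1)).getD 0
        let first_number := (PySem.List.pyGet? numbers 0).getD 0
        (first_number - (PySem.List.pyGet? previous_numbers 0).getD 0) ::
          numbers ++ [(PySem.List.pyGet? previous_numbers (-1)).getD 0 + last_number])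
      previous_numbers0
    -- after the loop the (mutated) number_array[0] is exactly `prev`
    [(PySem.List.pyGet? prev 0).getD 0, (PySem.List.pyGet? prev (-1)).getD 0]

-- ===== PORT B =====
def predict_set_alt (number_array : List (List Int)) : List Int :=
  let nxt := number_array.foldl (fun acc row => acc + (PySem.List.pyGet? row (-1)).getD 0) 0
  let prv := number_array.reverse.foldl (fun p row => (PySem.List.pyGet? row 0).getD 0 - p) 0
  [prv, nxt]

-- ===== PRECONDITION & SPEC =====
-- Python A raises IndexError on an empty number_array and on any empty row.
def Pre_predict_set (number_array : List (List Int)) : Prop :=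
  number_array ≠ [] ∧ ∀ r ∈ number_array, r ≠ []
instance (number_array : List (List Int)) : Decidable (Pre_predict_set number_array) := by
  unfold Pre_predict_set; infer_instance
def pvWitness_predict_set : List (List Int) := [[1, 2], [3]]

def Spec_predict_set (number_array : List (List Int)) (out : List Int) : Prop := out = predict_set_alt number_array
instance (number_array : List (List Int)) (out : List Int) : Decidable (Spec_predict_set number_array out) := by unfold Spec_predict_set; infer_instance

-- ===== CLAIM (what is proved, stated in full; the proofs are below) =====
def Claim_equal_predict_set : Prop := ∀ (number_array : List (List Int)), Dom_predict_set number_array → Pre_predict_set number_array → Spec_predict_set number_array (predict_set number_array)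

-- ===== LEMMAS AND PROOFS =====

-- alternating difference of first elements (accumulator form) and sum of last elements
def pvAltF : List (List Int) → Int → Int
  | [], p => p
  | r :: rest, p => r.head?.getD 0 - pvAltF rest p

def pvSumL : List (List Int) → Int
  | [] => 0
  | r :: rest => r.getLast?.getD 0 + pvSumL rest

-- one iteration of A's loop body
def pvStepA (previous_numbers numbers : List Int) : List Int :=
  (numbers.head?.getD 0 - previous_numbers.head?.getD 0) ::
    numbers ++ [previous_numbers.getLast?.getD 0 + numbers.getLast?.getD 0]

-- recursion-shaped view of A's loop result (the final previous_numbers)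
def pvAres : List (List Int) → List Int
  | [] => []
  | r :: rest => if rest = [] then r else pvStepA (pvAres rest) r

theorem pvFoldA_eq_ares (l : List (List Int)) (lr : List Int) (h : l.getLast? = some lr) :
    (l.dropLast.reverse).foldl (fun previous_numbers numbers =>
        (numbers.head?.getD 0 - previous_numbers.head?.getD 0) ::
          numbers ++ [previous_numbers.getLast?.getD 0 + numbers.getLast?.getD 0]) lr
      = pvAres l := by
  induction l with
  | nil => simp at h
  | cons r rest ih =>
    cases rest with
    | nil => simp_all [pvAres]
    | cons s rest' =>
      have h' : (s :: rest').getLast? = some lr := by simpa using h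
      simp only [List.dropLast_cons_of_ne_nil (by simp : s :: rest' ≠ ([] : List (List Int))),
        List.reverse_cons, List.foldl_append, List.foldl_cons, List.foldl_nil, ih h']
      simp [pvAres, pvStepA]

theorem pvAres_head_last (l : List (List Int)) (h : l ≠ []) :
    (pvAres l).head?.getD 0 = pvAltF l 0 ∧ (pvAres l).getLast?.getD 0 = pvSumL l := by
  induction l with
  | nil => simp at h
  | cons r rest ih =>
    cases rest with
    | nil =>
      constructor
      · simp [pvAres, pvAltF]
      · simp [pvAres, pvSumL]
    | cons s rest' =>
      obtain ⟨ih1, ih2⟩ := ih (by simp)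
      have e : pvAres (r :: s :: rest') = pvStepA (pvAres (s :: rest')) r := by
        simp [pvAres]
      rw [e]
      generalize hq : pvAres (s :: rest') = q at ih1 ih2
      constructor
      · simp [pvStepA, pvAltF, ih1]
      · have hcat : pvStepA q r
            = ((r.head?.getD 0 - q.head?.getD 0) :: r)
              ++ [q.getLast?.getD 0 + r.getLast?.getD 0] := by simp [pvStepA]
        rw [hcat, List.getLast?_concat]
        simp only [Option.getD_some, ih2, pvSumL]
        omega

theorem pvA_closed (l : List (List Int)) (h : l ≠ []) :
    predict_set l = [pvAltF l 0, pvSumL l] := by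
  obtain ⟨lr, hl⟩ := List.getLast?_isSome.mpr h |> Option.isSome_iff_exists.mp
  obtain ⟨h1, h2⟩ := pvAres_head_last l h
  simp only [predict_set, PySem.List.pyGet?_neg_one, hl, PySem.List.slice_to_neg_one,
    PySem.List.pyGet?_zero, ← List.head?_eq_getElem?]
  rw [pvFoldA_eq_ares l lr hl, h1, h2]

theorem pvB_prv (l : List (List Int)) (p : Int) :
    l.reverse.foldl (fun p row => (PySem.List.pyGet? row 0).getD 0 - p) p = pvAltF l p := by
  induction l generalizing p with
  | nil => simp [pvAltF]
  | cons r rest ih =>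
    simp only [List.reverse_cons, List.foldl_append, List.foldl_cons, List.foldl_nil]
    rw [ih p]
    simp only [pvAltF, PySem.List.pyGet?_zero, ← List.head?_eq_getElem?]

theorem pvB_nxt (l : List (List Int)) (acc : Int) :
    l.foldl (fun acc row => acc + (PySem.List.pyGet? row (-1)).getD 0) acc = acc + pvSumL l := by
  induction l generalizing acc with
  | nil => simp [pvSumL]
  | cons r rest ih =>
    simp only [List.foldl_cons]
    rw [ih]
    simp only [pvSumL, PySem.List.pyGet?_neg_one]
    omega

theorem pvB_closed (l : List (List Int)) :
    predict_set_alt l = [pvAltF l 0, pvSumL l] := by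
  simp only [predict_set_alt]
  rw [pvB_prv l 0, pvB_nxt l 0]
  simp

-- ===== VERDICT (by name: the statement is the Claim_ definition above) =====
theorem predict_set_spec : Claim_equal_predict_set := by
  intro na _ hpre
  unfold Spec_predict_set
  rw [pvA_closed na hpre.1, pvB_closed na]
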